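-- pv_equiv track=rewrite | github.com/fredericlepied/test-spec-extractor | match/analyze_test_suites.py | analyze_individual_suites
-- ===== SOURCE A (Python) =====
-- def analyze_individual_suites(specs, suite_type):
--     """Analyze individual test suites from combined specs."""
--     suites = {}
--
--     # Group specs by repository (extracted from test_id)
--     for spec in specs:
--         test_id = spec.get("test_id", "")
--         if ":" in test_id:
--             # Extract repository name from test_id (e.g., "eco-gotests/path/file.go:TestFunc")
--             repo_name = test_id.split("/")[0]
--             if repo_name not in suites:
--                 suites[repo_name] = []
--             suites[repo_name].append(spec)
--
--     return suites
-- ===== SOURCE B (Python) =====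
-- def analyze_individual_suites(specs, suite_type):
--     """Analyze individual test suites from combined specs."""
--     # Two-phase: project each qualifying spec to (repo, spec) once, then build
--     # the result per repo key (first-appearance order) by gathering matches.
--     keyed = [(spec.get("test_id", "").split("/")[0], spec)
--              for spec in specs if ":" in spec.get("test_id", "")]
--     return {repo: [s for r, s in keyed if r == repo]
--             for repo in dict.fromkeys(r for r, _ in keyed)}
-- ===== Notes on version B (the rewrite author's own statement) =====
-- stated objective: alternative
-- what changed: A buckets specs into a dict incrementally in one pass; B first projects qualifying specs to (repo, spec) pairs, then builds the dict by ordered key-dedup plus a per-key gathering filter.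
import Mathlib
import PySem

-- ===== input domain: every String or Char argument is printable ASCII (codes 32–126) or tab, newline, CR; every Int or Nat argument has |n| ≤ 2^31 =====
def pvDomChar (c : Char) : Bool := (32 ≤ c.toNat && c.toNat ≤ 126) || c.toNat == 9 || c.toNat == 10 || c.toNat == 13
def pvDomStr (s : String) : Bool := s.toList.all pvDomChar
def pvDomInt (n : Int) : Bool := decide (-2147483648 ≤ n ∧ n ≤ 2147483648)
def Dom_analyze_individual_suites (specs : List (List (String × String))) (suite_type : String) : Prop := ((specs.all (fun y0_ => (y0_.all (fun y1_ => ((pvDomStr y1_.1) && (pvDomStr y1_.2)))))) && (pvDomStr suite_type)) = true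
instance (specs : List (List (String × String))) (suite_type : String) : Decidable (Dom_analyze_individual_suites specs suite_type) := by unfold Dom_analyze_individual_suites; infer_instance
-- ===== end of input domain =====

-- B replaces A's incremental dict bucketing by a keyed projection followed by an
-- ordered key-dedup and a per-key gathering filter (objective: alternative).

-- ===== PORT A =====
def analyze_individual_suites (specs : List (List (String × String))) (suite_type : String) : List (String × List (List (String × String))) :=
  (specs.foldl (fun (suites : PySem.Dict String (List (List (String × String)))) spec =>
      let test_id := (PySem.Dict.mk spec).getD "test_id" ""
      if PySem.Str.isIn ":" test_id then
        let repo_name := PySem.List.pyGetD ((PySem.Str.split? test_id "/").getD []) 0 ""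
        let suites := if suites.contains repo_name then suites else suites.insert repo_name []
        suites.modify repo_name [] (fun l => l ++ [spec])
      else suites)
    PySem.Dict.empty).items

-- ===== PORT B =====
def analyze_individual_suites_alt (specs : List (List (String × String))) (suite_type : String) : List (String × List (List (String × String))) :=
  let keyed := (specs.filter (fun spec => PySem.Str.isIn ":" ((PySem.Dict.mk spec).getD "test_id" ""))).map
      (fun spec => (PySem.List.pyGetD ((PySem.Str.split? ((PySem.Dict.mk spec).getD "test_id" "") "/").getD []) 0 "", spec))
  (PySem.List.dedup (keyed.map (fun p => p.1))).map
      (fun repo => (repo, (keyed.filter (fun p => p.1 == repo)).map (fun p => p.2)))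

-- ===== PRECONDITION & SPEC =====
def Spec_analyze_individual_suites (specs : List (List (String × String))) (suite_type : String) (out : List (String × List (List (String × String)))) : Prop := out = analyze_individual_suites_alt specs suite_type
instance (specs : List (List (String × String))) (suite_type : String) (out : List (String × List (List (String × String)))) : Decidable (Spec_analyze_individual_suites specs suite_type out) := by unfold Spec_analyze_individual_suites; infer_instance

-- ===== CLAIM (what is proved, stated in full; the proofs are below) =====
def Claim_equal_analyze_individual_suites : Prop := ∀ (specs : List (List (String × String))) (suite_type : String), Dom_analyze_individual_suites specs suite_type → Spec_analyze_individual_suites specs suite_type (analyze_individual_suites specs suite_type)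

-- ===== LEMMAS AND PROOFS =====

-- The 'if repo not in suites: suites[repo] = []' guard followed by the append is one modify.
theorem pv_step_eq {α : Type} (d : PySem.Dict String (List α)) (k : String) (v : α) :
    (if d.contains k then d else d.insert k []).modify k [] (fun l => l ++ [v])
      = d.modify k [] (fun l => l ++ [v]) := by
  by_cases h : d.contains k = true
  · simp [h]
  · have h' : d.contains k = false := by simpa using h
    simp only [h', Bool.false_eq_true, if_false, PySem.Dict.modify,
      PySem.Dict.getD_insert_self, PySem.Dict.insert_insert_self,
      PySem.Dict.getD_of_not_contains d [] h']

-- Generic grouping fact: A's bucketing fold, as an items list, is B's dedup-then-gather map.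
theorem pv_group_eq {α : Type} (P : α → Bool) (K : α → String) (specs : List α) :
    (specs.foldl (fun (d : PySem.Dict String (List α)) s =>
        if P s then (if d.contains (K s) then d else d.insert (K s) []).modify (K s) [] (fun l => l ++ [s])
        else d) PySem.Dict.empty).items
      = (PySem.List.dedup (((specs.filter P).map (fun s => (K s, s))).map (fun p => p.1))).map
          (fun k => (k, (((specs.filter P).map (fun s => (K s, s))).filter (fun p => p.1 == k)).map (fun p => p.2))) := by
  have hbody : (fun (d : PySem.Dict String (List α)) s =>
        if P s then (if d.contains (K s) then d else d.insert (K s) []).modify (K s) [] (fun l => l ++ [s])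
        else d)
      = (fun d s => if P s then d.modify (K s) [] (fun l => l ++ [s]) else d) := by
    funext d s
    by_cases h : P s = true <;> simp [h, pv_step_eq]
  rw [hbody, PySem.List.foldl_if_eq_foldl_filter]
  have hmap : List.foldl (fun (d : PySem.Dict String (List α)) s => d.modify (K s) [] (fun l => l ++ [s])) PySem.Dict.empty (specs.filter P)
      = List.foldl (fun (d : PySem.Dict String (List α)) p => d.modify p.1 [] (fun l => l ++ [p.2])) PySem.Dict.empty ((specs.filter P).map (fun s => (K s, s))) := by
    rw [List.foldl_map]
  rw [hmap]
  set keyed := (specs.filter P).map (fun s => (K s, s)) with hk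
  have hnd : (List.foldl (fun (d : PySem.Dict String (List α)) p => d.modify p.1 [] (fun l => l ++ [p.2])) PySem.Dict.empty keyed).keys.Nodup := by
    exact PySem.Dict.nodup_keys_foldl_modify_key keyed (fun p => p.1) [] (fun _ p l => l ++ [p.2]) PySem.Dict.empty (by simp [PySem.Dict.keys_empty])
  rw [PySem.Dict.items_eq_map_keys _ hnd []]
  have hkeys : (List.foldl (fun (d : PySem.Dict String (List α)) p => d.modify p.1 [] (fun l => l ++ [p.2])) PySem.Dict.empty keyed).keys
      = PySem.List.dedup (keyed.map (fun p => p.1)) := by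
    rw [PySem.Dict.keys_foldl_modify_key keyed (fun p => p.1) [] (fun _ p l => l ++ [p.2]) PySem.Dict.empty]
    simp [PySem.Dict.keys_empty, PySem.Set.update_nil_left, PySem.List.dedup_eq_ofList]
  rw [hkeys]
  refine List.map_congr_left ?_
  intro k _
  rw [PySem.Dict.getD_foldl_modify_append keyed PySem.Dict.empty k]
  simp [PySem.Dict.getD_empty]

-- ===== VERDICT (by name: the statement is the Claim_ definition above) =====
theorem analyze_individual_suites_spec : Claim_equal_analyze_individual_suites := by
  intro specs suite_type _
  show analyze_individual_suites specs suite_type = analyze_individual_suites_alt specs suite_type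
  exact pv_group_eq (fun spec => PySem.Str.isIn ":" ((PySem.Dict.mk spec).getD "test_id" ""))
    (fun spec => PySem.List.pyGetD ((PySem.Str.split? ((PySem.Dict.mk spec).getD "test_id" "") "/").getD []) 0 "") specs
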